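-- pv_equiv track=rewrite | github.com/llnl/SSAPy-Toolkit | math.py | deg90to90
-- ===== SOURCE A (Python) =====
-- def deg90to90(val_in):
--     if hasattr(val_in, "__len__"):
--         val_out = []
--         for i, v in enumerate(val_in):
--             while v < -90:
--                 v += 90
--             while v > 90:
--                 v -= 90
--             val_out.append(v)
--     else:
--         while val_in < -90:
--             val_in += 90
--         while val_in > 90:
--             val_in -= 90
--         val_out = val_in
--     return val_out
-- ===== SOURCE B (Python) =====
-- def _reduce90(v):
--     # closed-form equivalent of the two while loops
--     if v > 90:
--         return (v - 1) % 90 + 1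
--     if v < -90:
--         return -((-v - 1) % 90 + 1)
--     return v
--
-- def deg90to90(val_in):
--     if hasattr(val_in, "__len__"):
--         return [_reduce90(v) for v in val_in]
--     return _reduce90(val_in)
-- ===== Notes on version B (the rewrite author's own statement) =====
-- stated objective: faster
-- what changed: Replaces the per-element while loops (add/subtract 90 until in range) with an O(1) closed-form modular reduction per element.
import Mathlib
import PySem

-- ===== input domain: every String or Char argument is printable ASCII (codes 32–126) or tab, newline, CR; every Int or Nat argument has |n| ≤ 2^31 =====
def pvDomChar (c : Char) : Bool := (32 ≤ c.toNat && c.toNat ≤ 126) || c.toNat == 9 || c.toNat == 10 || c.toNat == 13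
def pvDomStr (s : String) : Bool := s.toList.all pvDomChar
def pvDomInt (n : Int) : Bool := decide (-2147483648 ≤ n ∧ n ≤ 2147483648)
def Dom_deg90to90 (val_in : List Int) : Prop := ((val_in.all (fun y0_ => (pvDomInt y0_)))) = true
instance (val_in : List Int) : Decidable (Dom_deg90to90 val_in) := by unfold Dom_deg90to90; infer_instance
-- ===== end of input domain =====

-- B replaces A's per-element add/subtract-90 while loops with an O(1) closed-form
-- modular reduction per element (return value only; A mutates nothing observable).

-- ===== PORT A =====
-- 'while v < -90: v += 90'
def degWhileAdd (v : Int) : Int :=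
  if v < -90 then degWhileAdd (v + 90) else v
termination_by (-90 - v).toNat
decreasing_by omega

-- 'while v > 90: v -= 90'
def degWhileSub (v : Int) : Int :=
  if v > 90 then degWhileSub (v - 90) else v
termination_by (v - 90).toNat
decreasing_by omega

def deg90to90 (val_in : List Int) : List Int :=
  val_in.foldl (fun val_out v => val_out ++ [degWhileSub (degWhileAdd v)]) []

-- ===== PORT B =====
def degReduce90 (v : Int) : Int :=
  if v > 90 then PySem.Int.mod (v - 1) 90 + 1
  else if v < -90 then -(PySem.Int.mod (-v - 1) 90 + 1)
  else v

def deg90to90_alt (val_in : List Int) : List Int :=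
  val_in.map degReduce90

-- ===== PRECONDITION & SPEC =====
def Spec_deg90to90 (val_in : List Int) (out : List Int) : Prop := out = deg90to90_alt val_in
instance (val_in : List Int) (out : List Int) : Decidable (Spec_deg90to90 val_in out) := by unfold Spec_deg90to90; infer_instance

-- ===== CLAIM (what is proved, stated in full; the proofs are below) =====
def Claim_equal_deg90to90 : Prop := ∀ (val_in : List Int), Dom_deg90to90 val_in → Spec_deg90to90 val_in (deg90to90 val_in)

-- ===== LEMMAS AND PROOFS =====
theorem degWhileAdd_eq (v : Int) :
    degWhileAdd v = if v < -90 then -((-v - 1) % 90 + 1) else v := by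
  fun_induction degWhileAdd v with
  | case1 v h ih =>
      rw [ih]
      split_ifs with h2 <;> omega
  | case2 v h =>
      simp [if_neg h]

theorem degWhileSub_eq (v : Int) :
    degWhileSub v = if v > 90 then (v - 1) % 90 + 1 else v := by
  fun_induction degWhileSub v with
  | case1 v h ih =>
      rw [ih]
      split_ifs with h2 <;> omega
  | case2 v h =>
      simp [if_neg h]

theorem degPointwise (v : Int) : degWhileSub (degWhileAdd v) = degReduce90 v := by
  have hm : ∀ a : Int, PySem.Int.mod a 90 = a % 90 := fun a =>
    PySem.Int.mod_eq_emod_of_pos (by norm_num)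
  by_cases hneg : v < -90
  · have h0 : (0:Int) ≤ (-v - 1) % 90 := Int.emod_nonneg _ (by norm_num)
    have h90 : (-v - 1) % 90 < 90 := Int.emod_lt_of_pos _ (by norm_num)
    rw [degWhileAdd_eq, if_pos hneg, degWhileSub_eq, if_neg (by omega)]
    simp only [degReduce90, hm]
    rw [if_neg (by omega), if_pos hneg]
  · rw [degWhileAdd_eq, if_neg hneg, degWhileSub_eq]
    simp only [degReduce90, hm]
    rw [if_neg hneg]

theorem degFold (l : List Int) (acc : List Int) :
    l.foldl (fun val_out v => val_out ++ [degWhileSub (degWhileAdd v)]) acc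
      = acc ++ l.map degReduce90 := by
  induction l generalizing acc with
  | nil => simp
  | cons x xs ih => rw [List.foldl_cons, ih]; simp [degPointwise]

-- ===== VERDICT (by name: the statement is the Claim_ definition above) =====
theorem deg90to90_spec : Claim_equal_deg90to90 := by
  intro val_in _
  unfold Spec_deg90to90 deg90to90 deg90to90_alt
  simpa using degFold val_in []
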